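-- pv_equiv track=rewrite | github.com/ArdCarraigh/Blender_SRT_Addon | io_mesh_srt/utils.py | getAttributesComponents
-- ===== SOURCE A (Python) =====
-- def getAttributesComponents(attributes):
--     components = []
--     for i in range(len(attributes)):
--         if attributes[i] == "VERTEX_ATTRIB_UNASSIGNED":
--             components.append("VERTEX_COMPONENT_UNASSIGNED")
--         else:
--             n = 0
--             for j in range(len(attributes[:i])):
--                 if attributes[j] == attributes[i]:
--                     n += 1
--             match n:
--                 case 0:
--                     components.append("VERTEX_COMPONENT_X")
--                 case 1:
--                     components.append("VERTEX_COMPONENT_Y")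
--                 case 2:
--                     components.append("VERTEX_COMPONENT_Z")
--                 case 3:
--                     components.append("VERTEX_COMPONENT_W")
--     return(components)
-- ===== SOURCE B (Python) =====
-- def getAttributesComponents(attributes):
--     # Group positions by attribute value in one pass, then label each value's
--     # occurrences (all of them for UNASSIGNED, the first four otherwise) and
--     # reassemble the labels in original position order.
--     positions = {}
--     for i, v in enumerate(attributes):
--         positions.setdefault(v, []).append(i)
--     names = ["VERTEX_COMPONENT_X", "VERTEX_COMPONENT_Y",
--              "VERTEX_COMPONENT_Z", "VERTEX_COMPONENT_W"]
--     label_at = {}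
--     for v, idxs in positions.items():
--         if v == "VERTEX_ATTRIB_UNASSIGNED":
--             for i in idxs:
--                 label_at[i] = "VERTEX_COMPONENT_UNASSIGNED"
--         else:
--             for k, i in enumerate(idxs[:4]):
--                 label_at[i] = names[k]
--     return [label_at[i] for i in range(len(attributes)) if i in label_at]
-- ===== Notes on version B (the rewrite author's own statement) =====
-- stated objective: faster
-- what changed: Replaced the per-position backward rescan with a single grouping pass (value -> list of positions), a labelling pass over each group, and a reassembly pass by original position.
import Mathlib
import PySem

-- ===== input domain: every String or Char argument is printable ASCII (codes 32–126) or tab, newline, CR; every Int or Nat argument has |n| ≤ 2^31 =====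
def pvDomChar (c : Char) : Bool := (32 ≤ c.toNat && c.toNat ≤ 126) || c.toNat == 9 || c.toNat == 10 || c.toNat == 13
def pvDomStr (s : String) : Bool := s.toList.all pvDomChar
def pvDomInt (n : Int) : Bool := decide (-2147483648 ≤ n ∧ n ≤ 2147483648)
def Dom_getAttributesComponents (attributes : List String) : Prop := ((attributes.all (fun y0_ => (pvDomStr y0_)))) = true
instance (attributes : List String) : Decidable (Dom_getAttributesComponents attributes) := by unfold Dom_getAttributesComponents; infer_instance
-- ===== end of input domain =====

-- B replaces A's per-position backward rescans by one grouping pass (value → positions),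
-- a labelling pass over each group, and a reassembly pass by original position (measured faster).

-- ===== PORT A =====
-- loop body of A's 'for i in range(len(attributes))' (the Python match-case on the literals
-- 0..3 is ported as the equivalent literal if-chain)
def pvBodyA (attributes : List String) (components : List String) (i : Int) : List String :=
  let ai := PySem.List.pyGetD attributes i ""
  if ai = "VERTEX_ATTRIB_UNASSIGNED" then
    components ++ ["VERTEX_COMPONENT_UNASSIGNED"]
  else
    let n : Int := (PySem.List.pyRange 0
        (PySem.List.len (PySem.List.slice attributes none (some i))) 1).foldl
      (fun n j => if PySem.List.pyGetD attributes j "" = ai then n + 1 else n) 0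
    if n = 0 then components ++ ["VERTEX_COMPONENT_X"]
    else if n = 1 then components ++ ["VERTEX_COMPONENT_Y"]
    else if n = 2 then components ++ ["VERTEX_COMPONENT_Z"]
    else if n = 3 then components ++ ["VERTEX_COMPONENT_W"]
    else components

def getAttributesComponents (attributes : List String) : List String :=
  (PySem.List.pyRange 0 (PySem.List.len attributes) 1).foldl (pvBodyA attributes) []

-- ===== PORT B =====
def pvNames : List String :=
  ["VERTEX_COMPONENT_X", "VERTEX_COMPONENT_Y", "VERTEX_COMPONENT_Z", "VERTEX_COMPONENT_W"]

-- 'positions.setdefault(v, []).append(i)' for one enumerate pair p = (i, v)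
def pvPosStep (d : PySem.Dict String (List Int)) (p : Int × String) : PySem.Dict String (List Int) :=
  d.modify p.2 [] (· ++ [p.1])

-- body of B's 'for v, idxs in positions.items()' loop, building label_at
def pvLabStep (d : PySem.Dict Int String) (g : String × List Int) : PySem.Dict Int String :=
  if g.1 = "VERTEX_ATTRIB_UNASSIGNED" then
    g.2.foldl (fun d i => d.insert i "VERTEX_COMPONENT_UNASSIGNED") d
  else
    (PySem.List.enumerate (PySem.List.slice g.2 none (some 4)) 0).foldl
      (fun d p => d.insert p.2 (PySem.List.pyGetD pvNames p.1 "")) d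

def getAttributesComponents_alt (attributes : List String) : List String :=
  let positions : PySem.Dict String (List Int) :=
    (PySem.List.enumerate attributes 0).foldl pvPosStep PySem.Dict.empty
  let labelAt : PySem.Dict Int String :=
    positions.items.foldl pvLabStep PySem.Dict.empty
  (PySem.List.pyRange 0 (PySem.List.len attributes) 1).filterMap (fun i => labelAt.get? i)

-- ===== PRECONDITION & SPEC =====
def Spec_getAttributesComponents (attributes : List String) (out : List String) : Prop := out = getAttributesComponents_alt attributes
instance (attributes : List String) (out : List String) : Decidable (Spec_getAttributesComponents attributes out) := by unfold Spec_getAttributesComponents; infer_instance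

-- ===== CLAIM (what is proved, stated in full; the proofs are below) =====
def Claim_equal_getAttributesComponents : Prop := ∀ (attributes : List String), Dom_getAttributesComponents attributes → Spec_getAttributesComponents attributes (getAttributesComponents attributes)

-- ===== LEMMAS AND PROOFS =====

-- the label A emits for position k (none = a 5th-or-later occurrence, which A drops)
def pvLbl (attrs : List String) (k : Nat) : Option String :=
  match attrs[k]? with
  | none => none
  | some v =>
    if v = "VERTEX_ATTRIB_UNASSIGNED" then some "VERTEX_COMPONENT_UNASSIGNED"
    else
      let c := (attrs.take k).count v
      if c = 0 then some "VERTEX_COMPONENT_X"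
      else if c = 1 then some "VERTEX_COMPONENT_Y"
      else if c = 2 then some "VERTEX_COMPONENT_Z"
      else if c = 3 then some "VERTEX_COMPONENT_W"
      else none

-- the positions of value v in attrs, as B's positions dict stores them
def pvIdxs (attrs : List String) (v : String) : List Int :=
  ((PySem.List.enumerate attrs 0).filter (fun p => p.2 == v)).map (·.1)

-- the (key, label) pairs one group inserts into label_at
def pvPairsOf (g : String × List Int) : List (Int × String) :=
  if g.1 = "VERTEX_ATTRIB_UNASSIGNED" then
    g.2.map (fun i => (i, "VERTEX_COMPONENT_UNASSIGNED"))
  else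
    (PySem.List.enumerate (g.2.take 4) 0).map (fun p => (p.2, PySem.List.pyGetD pvNames p.1 ""))

def pvGroups (attrs : List String) : List (String × List Int) :=
  (PySem.Set.ofList attrs).map (fun v => (v, pvIdxs attrs v))

def pvL (attrs : List String) : List (Int × String) := (pvGroups attrs).flatMap pvPairsOf

-- ---- A side ----

lemma pvCountFold (attrs : List String) (v : String) :
    ∀ (k : Nat), k ≤ attrs.length → ∀ c : Int,
      (List.range k).foldl (fun n j => if attrs.getD j "" = v then n + 1 else n) c
        = c + ((attrs.take k).count v : Int) := by
  intro k
  induction k with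
  | zero => simp
  | succ k ih =>
    intro hk c
    rw [List.range_succ, List.foldl_append, ih (by omega)]
    have hlt : k < attrs.length := by omega
    rw [List.take_add_one]
    simp only [List.foldl_cons, List.foldl_nil,
      List.getD_eq_getElem?_getD, List.getElem?_eq_getElem hlt, Option.toList_some,
      List.count_append, List.count_cons, List.count_nil]
    by_cases h : attrs[k] = v
    · simp [h]; ring
    · simp [h]

lemma pvAstep (attrs : List String) (k : Nat) (hk : k < attrs.length) (init : List String) :
    pvBodyA attrs init (k : Int) = init ++ (pvLbl attrs k).toList := by
  unfold pvBodyA pvLbl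
  have hget : PySem.List.pyGetD attrs (k : Int) "" = attrs[k] := by
    simp [PySem.List.pyGetD_natCast, List.getD_eq_getElem?_getD, List.getElem?_eq_getElem hk]
  rw [hget]
  rw [PySem.List.slice_to_natCast]
  simp only [PySem.List.len_eq, List.length_take, Nat.min_eq_left (le_of_lt hk)]
  rw [PySem.List.pyRange_one]
  simp only [sub_zero, Int.toNat_natCast, List.foldl_map, zero_add]
  simp only [PySem.List.pyGetD_natCast]
  rw [pvCountFold attrs (attrs[k]) k (le_of_lt hk) 0]
  simp only [List.getElem?_eq_getElem hk, zero_add]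
  by_cases hU : attrs[k] = "VERTEX_ATTRIB_UNASSIGNED"
  · simp [hU]
  · simp only [hU, if_false]
    set c := (attrs.take k).count (attrs[k]) with hc
    simp only [show ((c : Int) = 0) ↔ c = 0 by omega, show ((c : Int) = 1) ↔ c = 1 by omega,
      show ((c : Int) = 2) ↔ c = 2 by omega, show ((c : Int) = 3) ↔ c = 3 by omega]
    split_ifs <;> simp

lemma pvFoldToList {α β : Type} (f : α → Option β) :
    ∀ (xs : List α) (init : List β),
      xs.foldl (fun acc x => acc ++ (f x).toList) init = init ++ xs.filterMap f := by
  intro xs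
  induction xs with
  | nil => simp
  | cons x xs ih =>
    intro init
    cases hx : f x <;> simp [List.foldl_cons, ih, hx]

lemma pvA_canon (attrs : List String) :
    getAttributesComponents attrs = (List.range attrs.length).filterMap (pvLbl attrs) := by
  unfold getAttributesComponents
  simp only [PySem.List.len_eq]
  rw [PySem.List.pyRange_one]
  simp only [sub_zero, Int.toNat_natCast, List.foldl_map, zero_add]
  rw [PySem.List.foldl_congr_mem _ _ (fun acc k => acc ++ (pvLbl attrs k).toList) _
    (fun acc k hkmem => pvAstep attrs k (List.mem_range.mp hkmem) acc)]
  exact pvFoldToList _ _ _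

-- ---- B side ----

lemma pvPos_items (attrs : List String) :
    ((PySem.List.enumerate attrs 0).foldl pvPosStep PySem.Dict.empty).items = pvGroups attrs := by
  have hkeys : ((PySem.List.enumerate attrs 0).foldl pvPosStep PySem.Dict.empty).keys
      = PySem.Set.ofList attrs := by
    have h := PySem.Dict.keys_foldl_modify_key (PySem.List.enumerate attrs 0)
      (fun p => p.2) [] (fun _ p => (· ++ [p.1])) PySem.Dict.empty
    rw [show (fun (d : PySem.Dict String (List Int)) (x : Int × String) =>
        d.modify x.2 [] ((fun _ p => (· ++ [p.1])) d x)) = pvPosStep from rfl] at h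
    rw [h, PySem.Dict.keys_empty, PySem.Set.update_nil_left, PySem.List.map_snd_enumerate]
  have hnd : ((PySem.List.enumerate attrs 0).foldl pvPosStep PySem.Dict.empty).keys.Nodup := by
    rw [hkeys]; exact PySem.Set.nodup_ofList attrs
  have hgetD : ∀ v, ((PySem.List.enumerate attrs 0).foldl pvPosStep PySem.Dict.empty).getD v []
      = pvIdxs attrs v := by
    intro v
    have hswap : (PySem.List.enumerate attrs 0).foldl pvPosStep PySem.Dict.empty
        = ((PySem.List.enumerate attrs 0).map (fun p => (p.2, p.1))).foldl
            (fun d p => d.modify p.1 [] (· ++ [p.2])) PySem.Dict.empty := by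
      rw [List.foldl_map]; rfl
    rw [hswap, PySem.Dict.getD_foldl_modify_append]
    rw [PySem.Dict.getD_empty]
    rw [List.filter_map, List.map_map]
    rfl
  rw [PySem.Dict.items_eq_map_keys _ hnd ([] : List Int), hkeys]
  unfold pvGroups
  exact List.map_congr_left (fun v _ => by rw [hgetD v])

lemma pvLabStep_eq (d : PySem.Dict Int String) (g : String × List Int) :
    pvLabStep d g = (pvPairsOf g).foldl (fun d q => d.insert q.1 q.2) d := by
  unfold pvLabStep pvPairsOf
  by_cases h : g.1 = "VERTEX_ATTRIB_UNASSIGNED"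
  · simp only [h, if_true, List.foldl_map]
  · simp only [h, if_false]
    rw [PySem.List.slice_to g.2 (show (0:Int) ≤ 4 by decide)]
    rw [List.foldl_map]
    rfl

lemma pvFoldFlat {α β δ : Type} (h : α → List β) (f : δ → β → δ) :
    ∀ (l : List α) (init : δ),
      l.foldl (fun d g => (h g).foldl f d) init = (l.flatMap h).foldl f init := by
  intro l
  induction l with
  | nil => simp
  | cons g l ih => intro init; simp [List.foldl_cons, List.flatMap_cons, List.foldl_append, ih]

lemma pvMem_pvIdxs (attrs : List String) (v : String) (q : Int) :
    q ∈ pvIdxs attrs v ↔ ∃ (j : Nat) (_ : j < attrs.length), q = (j : Int) ∧ attrs[j] = v := by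
  unfold pvIdxs
  simp only [List.mem_map, List.mem_filter, PySem.List.mem_enumerate_iff]
  constructor
  · rintro ⟨p, ⟨⟨j, hj, rfl⟩, hbeq⟩, rfl⟩
    exact ⟨j, hj, by simp, beq_iff_eq.mp hbeq⟩
  · rintro ⟨j, hj, rfl, hv⟩
    exact ⟨((j : Int), attrs[j]), ⟨⟨j, hj, by simp⟩, beq_iff_eq.mpr hv⟩, rfl⟩

lemma pvIdxs_pairwise (attrs : List String) (v : String) :
    (pvIdxs attrs v).Pairwise (· < ·) := by
  unfold pvIdxs
  exact List.pairwise_map.mpr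
    (List.Pairwise.filter _ (PySem.List.pairwise_lt_enumerate attrs 0))

lemma pvIdxs_nodup (attrs : List String) (v : String) : (pvIdxs attrs v).Nodup :=
  (pvIdxs_pairwise attrs v).imp (fun h => ne_of_lt h)

lemma pvKeys_pairsOf (g : String × List Int) (q : Int) (hq : q ∈ (pvPairsOf g).map (·.1)) :
    q ∈ g.2 ∧ (g.1 ≠ "VERTEX_ATTRIB_UNASSIGNED" → q ∈ g.2.take 4) := by
  unfold pvPairsOf at hq
  by_cases h : g.1 = "VERTEX_ATTRIB_UNASSIGNED"
  · simp only [h, if_true, List.map_map] at hq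
    simp only [List.mem_map] at hq
    obtain ⟨i, hi, rfl⟩ := hq
    exact ⟨hi, fun hne => absurd h hne⟩
  · simp only [h, if_false, List.map_map] at hq
    simp only [List.mem_map] at hq
    obtain ⟨p, hp, rfl⟩ := hq
    rw [PySem.List.mem_enumerate_iff] at hp
    obtain ⟨j, hj, rfl⟩ := hp
    have hmem : (g.2.take 4)[j] ∈ g.2.take 4 := List.getElem_mem hj
    exact ⟨List.mem_of_mem_take hmem, fun _ => hmem⟩

lemma pvIdxs_split (attrs : List String) (k : Nat) (hk : k < attrs.length) :
    ∃ pre suf, pvIdxs attrs (attrs[k]) = pre ++ (k : Int) :: suf ∧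
      pre.length = (attrs.take k).count (attrs[k]) ∧ (∀ q ∈ pre, q < (k : Int)) := by
  have hsplit : attrs = attrs.take k ++ attrs[k] :: attrs.drop (k + 1) := by
    rw [← List.drop_eq_getElem_cons hk, List.take_append_drop]
  refine ⟨((PySem.List.enumerate (attrs.take k) 0).filter (fun p => p.2 == attrs[k])).map (·.1),
    ((PySem.List.enumerate (attrs.drop (k+1)) ((k:Int)+1)).filter (fun p => p.2 == attrs[k])).map (·.1),
    ?_, ?_, ?_⟩
  · unfold pvIdxs
    rw [show attrs[k] = attrs.getD k "" by
      simp [List.getD_eq_getElem?_getD, List.getElem?_eq_getElem hk]] at hsplit ⊢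
    generalize hv : attrs.getD k "" = v at hsplit ⊢
    conv_lhs => rw [hsplit]
    rw [PySem.List.enumerate_append, PySem.List.enumerate_cons]
    have hlen : ((attrs.take k).length : Int) = (k : Int) := by
      simp [List.length_take, Nat.min_eq_left (le_of_lt hk)]
    rw [List.filter_append, List.filter_cons]
    simp only [beq_self_eq_true, if_true, List.map_append, List.map_cons, zero_add, hlen]
  · rw [List.length_map, ← List.countP_eq_length_filter]
    conv_rhs => rw [show attrs.take k = (PySem.List.enumerate (attrs.take k) 0).map (fun p => p.2)
      from (PySem.List.map_snd_enumerate _ 0).symm]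
    rw [List.count_eq_countP, List.countP_map]
    rfl
  · intro q hq
    simp only [List.mem_map, List.mem_filter] at hq
    obtain ⟨p, ⟨hp, _⟩, rfl⟩ := hq
    rw [PySem.List.mem_enumerate_iff] at hp
    obtain ⟨j, hj, rfl⟩ := hp
    simp only [List.length_take] at hj
    simp only [zero_add]
    exact_mod_cast (by omega : j < k)

lemma pvL_keys_nodup (attrs : List String) : ((pvL attrs).map (·.1)).Nodup := by
  unfold pvL
  rw [List.map_flatMap]
  rw [List.nodup_flatMap]
  constructor
  · rintro g hg
    unfold pvGroups at hg
    obtain ⟨v, _, rfl⟩ := List.mem_map.mp hg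
    unfold pvPairsOf
    by_cases h : v = "VERTEX_ATTRIB_UNASSIGNED"
    · simp only [h, if_true]
      rw [List.map_map]
      rw [show ((fun p : Int × String => p.1) ∘
        (fun i : Int => (i, "VERTEX_COMPONENT_UNASSIGNED"))) = (id : Int → Int) from rfl,
        List.map_id]
      exact pvIdxs_nodup attrs _
    · simp only [h, if_false]
      rw [List.map_map]
      rw [show ((fun p : Int × String => p.1) ∘
          (fun p : Int × Int => (p.2, PySem.List.pyGetD pvNames p.1 ""))) = (fun p => p.2) from rfl]
      rw [PySem.List.map_snd_enumerate]
      exact ((pvIdxs_nodup attrs v).sublist (List.take_sublist _ _))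
  · unfold pvGroups
    rw [List.pairwise_map]
    refine List.Pairwise.imp ?_ (List.Pairwise.imp (fun h => h) (PySem.Set.nodup_ofList attrs))
    intro v w hvw q hqv hqw
    have h1 := (pvKeys_pairsOf _ _ hqv).1
    have h2 := (pvKeys_pairsOf _ _ hqw).1
    rw [pvMem_pvIdxs] at h1 h2
    obtain ⟨j, hj, rfl, hjv⟩ := h1
    obtain ⟨j', hj', hjj, hjw⟩ := h2
    have : j' = j := by exact_mod_cast hjj.symm
    subst this
    exact hvw (hjv ▸ hjw ▸ rfl)

lemma pvLab_items (attrs : List String) :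
    ((pvGroups attrs).foldl pvLabStep PySem.Dict.empty).items = pvL attrs := by
  rw [PySem.List.foldl_congr_mem _ _
    (fun d g => (pvPairsOf g).foldl (fun d q => d.insert q.1 q.2) d) _
    (fun d g _ => pvLabStep_eq d g)]
  rw [pvFoldFlat]
  have := PySem.Dict.items_foldl_insert_fresh (pvL attrs) (fun q => q.1) (fun q => q.2)
    PySem.Dict.empty (fun a _ => PySem.Dict.contains_empty _) (pvL_keys_nodup attrs)
  rw [show (fun (d : PySem.Dict Int String) (a : Int × String) => d.insert a.1 a.2)
      = (fun d q => d.insert q.1 q.2) from rfl] at this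
  rw [show List.flatMap pvPairsOf (pvGroups attrs) = pvL attrs from rfl, this]
  show [] ++ _ = _
  simp

lemma pvGet (attrs : List String) (k : Nat) (hk : k < attrs.length) :
    ((pvGroups attrs).foldl pvLabStep PySem.Dict.empty).get? (k : Int) = pvLbl attrs k := by
  set d := (pvGroups attrs).foldl pvLabStep PySem.Dict.empty with hd
  have hitems : d.items = pvL attrs := pvLab_items attrs
  have hkeys : d.keys = (pvL attrs).map (·.1) := by
    simp only [PySem.Dict.keys, hitems]
  have hknd : d.keys.Nodup := by rw [hkeys]; exact pvL_keys_nodup attrs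
  by_cases hU : attrs[k] = "VERTEX_ATTRIB_UNASSIGNED"
  · have hmemL : (((k : Int), "VERTEX_COMPONENT_UNASSIGNED") : Int × String) ∈ pvL attrs := by
      unfold pvL
      rw [List.mem_flatMap]
      refine ⟨("VERTEX_ATTRIB_UNASSIGNED", pvIdxs attrs "VERTEX_ATTRIB_UNASSIGNED"), ?_, ?_⟩
      · exact List.mem_map.mpr ⟨"VERTEX_ATTRIB_UNASSIGNED",
          (PySem.Set.mem_ofList _ _).mpr (hU ▸ List.getElem_mem hk), rfl⟩
      · unfold pvPairsOf
        exact List.mem_map.mpr ⟨(k : Int),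
          (pvMem_pvIdxs attrs _ _).mpr ⟨k, hk, rfl, hU⟩, rfl⟩
    rw [PySem.Dict.get?_of_mem_items d (hitems ▸ hmemL) hknd]
    unfold pvLbl
    simp [List.getElem?_eq_getElem hk, hU]
  · obtain ⟨pre, suf, hsp, hlen, hpre⟩ := pvIdxs_split attrs k hk
    by_cases ho : (attrs.take k).count attrs[k] < 4
    · set o := (attrs.take k).count attrs[k] with hoo
      have hidxlen : o < (pvIdxs attrs attrs[k]).length := by
        rw [hsp]; simp [← hlen]
      have htlen : o < ((pvIdxs attrs attrs[k]).take 4).length := by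
        simp only [List.length_take]; omega
      have hgo : ((pvIdxs attrs attrs[k]).take 4)[o] = (k : Int) := by
        rw [List.getElem_take, List.getElem_of_eq hsp hidxlen,
          List.getElem_append_right (by omega)]
        simp [← hlen]
      have hmemL : (((k : Int), pvNames.getD o "") : Int × String) ∈ pvL attrs := by
        unfold pvL
        rw [List.mem_flatMap]
        refine ⟨(attrs[k], pvIdxs attrs attrs[k]), ?_, ?_⟩
        · exact List.mem_map.mpr ⟨attrs[k],
            (PySem.Set.mem_ofList _ _).mpr (List.getElem_mem hk), rfl⟩
        · unfold pvPairsOf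
          simp only [hU, if_false]
          refine List.mem_map.mpr ⟨((o : Int), (k : Int)), ?_, by simp⟩
          rw [← hgo, PySem.List.mem_enumerate_iff]
          exact ⟨o, htlen, by simp⟩
      rw [PySem.Dict.get?_of_mem_items d (hitems ▸ hmemL) hknd]
      unfold pvLbl
      simp only [List.getElem?_eq_getElem hk, hU, if_false, ← hoo]
      interval_cases o <;> rfl
    · rw [(PySem.Dict.get?_eq_none_iff_not_mem_keys d _).mpr ?notmem]
      · unfold pvLbl
        simp only [List.getElem?_eq_getElem hk, hU, if_false]
        have h0 : ¬ (attrs.take k).count attrs[k] = 0 := by omega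
        have h1 : ¬ (attrs.take k).count attrs[k] = 1 := by omega
        have h2 : ¬ (attrs.take k).count attrs[k] = 2 := by omega
        have h3 : ¬ (attrs.take k).count attrs[k] = 3 := by omega
        simp [h0, h1, h2, h3]
      case notmem =>
        rw [hkeys]
        intro hmem
        obtain ⟨p, hpL, hp1⟩ := List.mem_map.mp hmem
        obtain ⟨g, hg, hpg⟩ := List.mem_flatMap.mp hpL
        obtain ⟨u, _, rfl⟩ := List.mem_map.mp hg
        have hkey : (k : Int) ∈ (pvPairsOf (u, pvIdxs attrs u)).map (·.1) :=
          hp1 ▸ List.mem_map_of_mem hpg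
        have h12 := pvKeys_pairsOf _ _ hkey
        have hu : u = attrs[k] := by
          have := (pvMem_pvIdxs attrs u _).mp h12.1
          obtain ⟨j, hj, hjk, hjv⟩ := this
          have : j = k := by exact_mod_cast hjk.symm
          subst this; exact hjv.symm
        subst hu
        have htk := h12.2 (by simpa using hU)
        rw [hsp, List.take_append_of_le_length (by omega)] at htk
        exact absurd (hpre _ (List.mem_of_mem_take htk)) (lt_irrefl _)

lemma pvB_canon (attrs : List String) :
    getAttributesComponents_alt attrs = (List.range attrs.length).filterMap (pvLbl attrs) := by
  unfold getAttributesComponents_alt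
  show List.filterMap (fun i => ((List.foldl pvLabStep PySem.Dict.empty
      ((List.foldl pvPosStep PySem.Dict.empty (PySem.List.enumerate attrs 0)).items)).get? i))
    (PySem.List.pyRange 0 (PySem.List.len attrs) 1) = _
  rw [pvPos_items]
  simp only [PySem.List.len_eq]
  rw [PySem.List.pyRange_one]
  simp only [sub_zero, Int.toNat_natCast]
  rw [List.filterMap_map]
  refine List.filterMap_congr ?_
  intro k hkmem
  simp only [Function.comp, zero_add]
  exact pvGet attrs k (List.mem_range.mp hkmem)

-- ===== VERDICT (by name: the statement is the Claim_ definition above) =====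
theorem getAttributesComponents_spec : Claim_equal_getAttributesComponents := by
  intro attrs _
  show _ = _
  rw [pvA_canon, pvB_canon]
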